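-- pv_equiv track=rewrite | github.com/veale/scholrss | app.py | _drop_excluded
-- ===== SOURCE A (Python) =====
-- def _drop_excluded(works, exclude_terms):
--     if not exclude_terms:
--         return works
--     exclude_lc = [t.lower() for t in exclude_terms if t and t.strip()]
--     if not exclude_lc:
--         return works
--     out = []
--     for w in works:
--         hay = (w.get("title", "") + " " + (w.get("abstract") or "")).lower()
--         if not any(term in hay for term in exclude_lc):
--             out.append(w)
--     return out
-- ===== SOURCE B (Python) =====
-- def _drop_excluded(works, exclude_terms):
--     terms = [t.lower() for t in exclude_terms if t.strip()]
--     if not terms: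
--         return works
--     kept = [(w, (w.get("title", "") + " " + (w.get("abstract") or "")).lower())
--             for w in works]
--     for term in terms:
--         kept = [(w, hay) for (w, hay) in kept if term not in hay]
--     return [w for (w, _) in kept]
-- ===== Notes on version B (the rewrite author's own statement) =====
-- stated objective: alternative
-- what changed: Term-major instead of work-major: B computes each work's lowercased haystack once, then successively filters the surviving (work, hay) pairs by one exclude term at a time, rather than testing every term against every work inside one accumulator loop; Pre_ excludes inputs where a work stores None under 'title' while an effective exclude term exists, on which both programs raise TypeError.
import Mathlib
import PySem

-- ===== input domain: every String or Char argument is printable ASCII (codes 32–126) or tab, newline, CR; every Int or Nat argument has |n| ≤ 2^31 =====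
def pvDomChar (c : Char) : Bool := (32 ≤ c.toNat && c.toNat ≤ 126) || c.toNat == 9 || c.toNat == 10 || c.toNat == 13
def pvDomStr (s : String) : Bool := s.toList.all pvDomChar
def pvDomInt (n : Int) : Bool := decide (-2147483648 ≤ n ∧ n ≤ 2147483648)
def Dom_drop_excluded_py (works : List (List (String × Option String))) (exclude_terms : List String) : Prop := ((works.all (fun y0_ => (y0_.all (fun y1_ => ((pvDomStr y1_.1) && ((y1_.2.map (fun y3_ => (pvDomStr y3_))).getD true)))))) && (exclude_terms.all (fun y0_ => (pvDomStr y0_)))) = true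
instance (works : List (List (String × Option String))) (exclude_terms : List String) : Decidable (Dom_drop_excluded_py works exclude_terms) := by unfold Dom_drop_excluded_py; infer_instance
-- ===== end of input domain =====

-- B filters term-by-term over once-computed haystacks instead of testing all terms per work;
-- return values proved equal on Pre_.

-- ===== PORT A =====
-- hay = (w.get("title","") + " " + (w.get("abstract") or "")).lower(), ported on List Char
-- (string concatenation done on toList; exact). A stored None under "title" raises TypeError
-- in Python and is excluded by Pre_.
def pvHay (w : List (String × Option String)) : List Char :=
  let title := (PySem.Dict.getD (PySem.Dict.mk w) "title" (some "")).getD ""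
  let abs := (PySem.Dict.getD (PySem.Dict.mk w) "abstract" none).getD ""
  PySem.Chars.lower (title.toList ++ [' '] ++ abs.toList)

def drop_excluded_py (works : List (List (String × Option String))) (exclude_terms : List String) : List (List (String × Option String)) :=
  if exclude_terms = [] then works
  else
    let exclude_lc := (exclude_terms.filter (fun t => t != "" && PySem.Str.strip t != "")).map PySem.Str.lower
    if exclude_lc = [] then works
    else
      works.foldl (fun out w =>
        if !(exclude_lc.any (fun term => PySem.Chars.isIn term.toList (pvHay w))) then out ++ [w]
        else out) []

-- ===== PORT B =====
def drop_excluded_py_alt (works : List (List (String × Option String))) (exclude_terms : List String) : List (List (String × Option String)) :=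
  let terms := (exclude_terms.filter (fun t => PySem.Str.strip t != "")).map PySem.Str.lower
  if terms = [] then works
  else
    let kept0 := works.map (fun w => (w, pvHay w))
    let kept := terms.foldl (fun k term => k.filter (fun p => !PySem.Chars.isIn term.toList p.2)) kept0
    kept.map (fun p => p.1)

-- ===== PRECONDITION & SPEC =====
-- Pre_ excludes exactly the inputs on which Python A raises TypeError: some effective (non-blank)
-- exclude term exists and some work stores None under "title" (then "" + None is attempted).
def Pre_drop_excluded_py (works : List (List (String × Option String))) (exclude_terms : List String) : Prop :=
  (exclude_terms.filter (fun t => PySem.Str.strip t != "") = []) ∨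
  (∀ w ∈ works, PySem.Dict.get? (PySem.Dict.mk w) "title" ≠ some none)
instance (works : List (List (String × Option String))) (exclude_terms : List String) : Decidable (Pre_drop_excluded_py works exclude_terms) := by unfold Pre_drop_excluded_py; infer_instance

def pvWitness_drop_excluded_py : (List (List (String × Option String))) × List String :=
  ([[("title", some "Big Cats")], [("abstract", some "dogs bark")]], ["cat", " "])

def Spec_drop_excluded_py (works : List (List (String × Option String))) (exclude_terms : List String) (out : List (List (String × Option String))) : Prop := out = drop_excluded_py_alt works exclude_terms
instance (works : List (List (String × Option String))) (exclude_terms : List String) (out : List (List (String × Option String))) : Decidable (Spec_drop_excluded_py works exclude_terms out) := by unfold Spec_drop_excluded_py; infer_instance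

-- ===== CLAIM (what is proved, stated in full; the proofs are below) =====
def Claim_equal_drop_excluded_py : Prop := ∀ (works : List (List (String × Option String))) (exclude_terms : List String), Dom_drop_excluded_py works exclude_terms → Pre_drop_excluded_py works exclude_terms → Spec_drop_excluded_py works exclude_terms (drop_excluded_py works exclude_terms)

-- ===== LEMMAS AND PROOFS =====

lemma foldl_filter_eq_filter_all {α : Type} (f : String → α → Bool) (terms : List String) (kept : List α) :
    terms.foldl (fun k term => k.filter (fun p => !f term p)) kept =
    kept.filter (fun p => terms.all (fun term => !f term p)) := by
  induction terms generalizing kept with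
  | nil => simp
  | cons t ts ih =>
    simp only [List.foldl_cons, ih, List.filter_filter, List.all_cons]
    apply List.filter_congr
    intro p _
    cases f t p <;> simp

lemma foldl_append_if_id {α : Type} (p : α → Bool) (l : List α) :
    l.foldl (fun acc x => if p x then acc ++ [x] else acc) [] = l.filter p := by
  have h := PySem.List.foldl_append_if p id l []
  simpa [id] using h

lemma filter_terms_eq (exclude_terms : List String) :
    exclude_terms.filter (fun t => t != "" && PySem.Str.strip t != "") =
    exclude_terms.filter (fun t => PySem.Str.strip t != "") := by
  apply List.filter_congr
  intro t _
  by_cases h : t = ""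
  · subst h; decide
  · simp [h]

-- ===== VERDICT (by name: the statement is the Claim_ definition above) =====
theorem drop_excluded_py_spec : Claim_equal_drop_excluded_py := by
  intro works exclude_terms _ _
  unfold Spec_drop_excluded_py drop_excluded_py drop_excluded_py_alt
  rw [filter_terms_eq]
  by_cases hnil : exclude_terms = []
  · subst hnil; simp
  · simp only [if_neg hnil]
    by_cases hterms : (exclude_terms.filter (fun t => PySem.Str.strip t != "")).map PySem.Str.lower = []
    · simp [hterms]
    · simp only [if_neg hterms]
      rw [foldl_append_if_id, foldl_filter_eq_filter_all]
      rw [List.filter_map, List.map_map]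
      simp only [Function.comp_def, List.map_id_fun', id]
      apply List.filter_congr
      intro w _
      simp [List.all_eq_not_any_not]
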